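-- pv_equiv track=rewrite | github.com/gracey0630/WTC-bedrock-hackathon | agentic-move-agent/agents/decision_agent.py | _fallback_volume_estimate
-- ===== SOURCE A (Python) =====
-- def _fallback_volume_estimate(item):
--     """Fallback volume estimation"""
--     name_lower = item['name'].lower()
--     desc_lower = item.get('description', '').lower()
--
--     # Check size descriptors
--     is_large = 'large' in desc_lower
--     is_small = 'small' in desc_lower
--
--     # Base estimates
--     if any(word in name_lower for word in ['sofa', 'couch', 'sectional']):
--         return 50 if is_large else 35
--     elif any(word in name_lower for word in ['bed', 'mattress']):
--         return 45 if 'king' in desc_lower or 'queen' in desc_lower else 30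
--     elif any(word in name_lower for word in ['table', 'desk', 'dining']):
--         return 25 if is_large else 15
--     elif any(word in name_lower for word in ['chair']):
--         return 8 if is_large else 5
--     elif any(word in name_lower for word in ['dresser', 'cabinet', 'bookshelf']):
--         return 30 if is_large else 20
--     else:
--         return 5  # small items
-- ===== SOURCE B (Python) =====
-- # Different decomposition: scan ALL keywords (a flat keyword->category map), take the
-- # minimal matching category, then compute the volume arithmetically as base + bump.
-- _CATEGORY = {'sofa': 0, 'couch': 0, 'sectional': 0,
--              'bed': 1, 'mattress': 1,
--              'table': 2, 'desk': 2, 'dining': 2,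
--              'chair': 3,
--              'dresser': 4, 'cabinet': 4, 'bookshelf': 4}
-- _BASE = [35, 30, 15, 5, 20]
-- _BUMP = [15, 15, 10, 3, 10]
--
-- def _fallback_volume_estimate(item):
--     name = item['name'].lower()
--     desc = item.get('description', '').lower()
--     cats = [c for k, c in _CATEGORY.items() if k in name]
--     if not cats:
--         return 5
--     c = min(cats)
--     if c == 1:
--         big = 'king' in desc or 'queen' in desc
--     else:
--         big = 'large' in desc
--     return _BASE[c] + _BUMP[c] * big
-- ===== Notes on version B (the rewrite author's own statement) =====
-- stated objective: alternative
-- what changed: Instead of an ordered if-elif ladder returning on the first matching keyword group, B scans all keywords of a flat keyword-to-category map, takes the minimum matching category, and computes the result arithmetically as base[c] + bump[c] * big-flag (with the bed category using its own king/queen flag).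
import Mathlib
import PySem

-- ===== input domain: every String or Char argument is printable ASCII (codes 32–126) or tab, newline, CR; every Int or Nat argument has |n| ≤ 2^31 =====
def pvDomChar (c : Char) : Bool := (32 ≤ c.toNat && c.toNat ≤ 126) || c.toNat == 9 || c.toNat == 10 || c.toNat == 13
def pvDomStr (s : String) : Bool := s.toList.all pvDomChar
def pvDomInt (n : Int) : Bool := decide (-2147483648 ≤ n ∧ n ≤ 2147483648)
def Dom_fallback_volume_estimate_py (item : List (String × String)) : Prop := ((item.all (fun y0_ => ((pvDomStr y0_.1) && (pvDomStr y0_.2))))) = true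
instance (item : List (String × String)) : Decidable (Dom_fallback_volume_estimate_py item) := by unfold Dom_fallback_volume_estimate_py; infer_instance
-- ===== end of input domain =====

-- B replaces A's first-hit if-elif ladder by a full scan of a flat keyword→category map,
-- taking the minimum matching category and computing base[c] + bump[c]*flag (objective: alternative).

-- ===== PORT A =====
def fallback_volume_estimate_py (item : List (String × String)) : Int :=
  match (PySem.Dict.mk item).get? "name" with
  | none => 0  -- unreachable: Pre_ requires the "name" key (Python raises KeyError)
  | some nm =>
    let name_lower := PySem.Str.lower nm
    let desc_lower := PySem.Str.lower ((PySem.Dict.mk item).getD "description" "")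
    let is_large := PySem.Str.isIn "large" desc_lower
    let _is_small := PySem.Str.isIn "small" desc_lower
    if ["sofa", "couch", "sectional"].any (fun w => PySem.Str.isIn w name_lower) then
      if is_large then 50 else 35
    else if ["bed", "mattress"].any (fun w => PySem.Str.isIn w name_lower) then
      if PySem.Str.isIn "king" desc_lower || PySem.Str.isIn "queen" desc_lower then 45 else 30
    else if ["table", "desk", "dining"].any (fun w => PySem.Str.isIn w name_lower) then
      if is_large then 25 else 15
    else if ["chair"].any (fun w => PySem.Str.isIn w name_lower) then
      if is_large then 8 else 5
    else if ["dresser", "cabinet", "bookshelf"].any (fun w => PySem.Str.isIn w name_lower) then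
      if is_large then 30 else 20
    else 5

-- ===== PORT B =====
def pvCategory : List (String × Int) :=
  [("sofa", 0), ("couch", 0), ("sectional", 0),
   ("bed", 1), ("mattress", 1),
   ("table", 2), ("desk", 2), ("dining", 2),
   ("chair", 3),
   ("dresser", 4), ("cabinet", 4), ("bookshelf", 4)]
def pvBase : List Int := [35, 30, 15, 5, 20]
def pvBump : List Int := [15, 15, 10, 3, 10]

def fallback_volume_estimate_py_alt (item : List (String × String)) : Int :=
  match (PySem.Dict.mk item).get? "name" with
  | none => 0
  | some nm =>
    let name := PySem.Str.lower nm
    let desc := PySem.Str.lower ((PySem.Dict.mk item).getD "description" "")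
    -- list comprehension [c for k, c in _CATEGORY.items() if k in name]
    let cats := pvCategory.foldr
      (fun kc acc => if PySem.Str.isIn kc.1 name then kc.2 :: acc else acc) []
    match PySem.List.min? cats (fun x => x) with
    | none => 5
    | some c =>
      let big := if c = 1 then
          PySem.Str.isIn "king" desc || PySem.Str.isIn "queen" desc
        else PySem.Str.isIn "large" desc
      PySem.List.pyGetD pvBase c 0 + PySem.List.pyGetD pvBump c 0 * (if big then 1 else 0)

-- ===== PRECONDITION & SPEC =====
-- Pre_ excludes exactly the inputs without a "name" key, on which Python A raises KeyError.
def Pre_fallback_volume_estimate_py (item : List (String × String)) : Prop :=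
  ((PySem.Dict.mk item).get? "name").isSome = true
instance (item : List (String × String)) : Decidable (Pre_fallback_volume_estimate_py item) := by
  unfold Pre_fallback_volume_estimate_py; infer_instance
def pvWitness_fallback_volume_estimate_py : (List (String × String)) := [("name", "Sofa"), ("description", "large")]
def Spec_fallback_volume_estimate_py (item : List (String × String)) (out : Int) : Prop := out = fallback_volume_estimate_py_alt item
instance (item : List (String × String)) (out : Int) : Decidable (Spec_fallback_volume_estimate_py item out) := by unfold Spec_fallback_volume_estimate_py; infer_instance

-- ===== CLAIM =====
def Claim_equal_fallback_volume_estimate_py : Prop := ∀ (item : List (String × String)), Dom_fallback_volume_estimate_py item → Pre_fallback_volume_estimate_py item → Spec_fallback_volume_estimate_py item (fallback_volume_estimate_py item)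

-- ===== LEMMAS AND PROOFS =====

-- The whole comparison depends only on the 12 keyword hit flags and 3 description flags.
def pvCondCats : List Int → List Bool → List Int
  | c :: cs, b :: bs => if b then c :: pvCondCats cs bs else pvCondCats cs bs
  | _, _ => []

theorem pv_cats_eq (f : String → Bool) :
    pvCategory.foldr (fun kc acc => if f kc.1 then kc.2 :: acc else acc) [] =
    pvCondCats [0, 0, 0, 1, 1, 2, 2, 2, 3, 4, 4, 4]
      [f "sofa", f "couch", f "sectional", f "bed", f "mattress", f "table",
       f "desk", f "dining", f "chair", f "dresser", f "cabinet", f "bookshelf"] := rfl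

theorem pv_key : ∀ (s0 s1 s2 s3 s4 s5 s6 s7 s8 s9 s10 s11 lg kg qn : Bool),
    (if s0 || (s1 || s2) then (if lg then (50:Int) else 35)
     else if s3 || s4 then (if kg || qn then 45 else 30)
     else if s5 || (s6 || s7) then (if lg then 25 else 15)
     else if s8 then (if lg then 8 else 5)
     else if s9 || (s10 || s11) then (if lg then 30 else 20)
     else 5)
    =
    (match PySem.List.min? (pvCondCats [0, 0, 0, 1, 1, 2, 2, 2, 3, 4, 4, 4]
        [s0, s1, s2, s3, s4, s5, s6, s7, s8, s9, s10, s11]) (fun x => x) with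
     | none => 5
     | some c =>
       PySem.List.pyGetD pvBase c 0 + PySem.List.pyGetD pvBump c 0 *
         (if (if c = 1 then kg || qn else lg) then 1 else 0)) := by
  decide

theorem pv_equal (item : List (String × String)) :
    fallback_volume_estimate_py item = fallback_volume_estimate_py_alt item := by
  unfold fallback_volume_estimate_py fallback_volume_estimate_py_alt
  cases h : (PySem.Dict.mk item).get? "name" with
  | none => rfl
  | some nm =>
    simp only [List.any_cons, List.any_nil, Bool.or_false]
    rw [pv_cats_eq (fun w => PySem.Str.isIn w (PySem.Str.lower nm))]
    exact pv_key _ _ _ _ _ _ _ _ _ _ _ _ _ _ _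

-- ===== VERDICT =====
theorem fallback_volume_estimate_py_spec : Claim_equal_fallback_volume_estimate_py := by
  intro item _ _
  unfold Spec_fallback_volume_estimate_py
  exact pv_equal item
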